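-- pv_equiv track=rewrite | github.com/CameronByer/AoC | 2024/day12.py | super_zone
-- ===== SOURCE A (Python) =====
-- def super_zone(zone):
--     fences = 0
--     for z in zone:
--         for dx, dy in ((0,1),(0,-1),(1,0),(-1,0)):
--             x = z[0]+dx
--             y = z[1]+dy
--             if not (x, y) in zone:
--                 fences += 1
--     return fences
-- ===== SOURCE B (Python) =====
-- def super_zone(zone):
--     cells = set(zone)
--     shared = 0
--     for (x, y) in zone:
--         if (x + 1, y) in cells:
--             shared += 1
--         if (x, y + 1) in cells:
--             shared += 1
--     return 4 * len(zone) - 2 * shared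
-- ===== Notes on version B (the rewrite author's own statement) =====
-- stated objective: alternative
-- what changed: A counts, for each cell, which of its 4 neighbours are absent; B counts each shared edge once (only right/down neighbour, via a set) and returns 4*len(zone) - 2*shared, a different identity and traversal.
import Mathlib
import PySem

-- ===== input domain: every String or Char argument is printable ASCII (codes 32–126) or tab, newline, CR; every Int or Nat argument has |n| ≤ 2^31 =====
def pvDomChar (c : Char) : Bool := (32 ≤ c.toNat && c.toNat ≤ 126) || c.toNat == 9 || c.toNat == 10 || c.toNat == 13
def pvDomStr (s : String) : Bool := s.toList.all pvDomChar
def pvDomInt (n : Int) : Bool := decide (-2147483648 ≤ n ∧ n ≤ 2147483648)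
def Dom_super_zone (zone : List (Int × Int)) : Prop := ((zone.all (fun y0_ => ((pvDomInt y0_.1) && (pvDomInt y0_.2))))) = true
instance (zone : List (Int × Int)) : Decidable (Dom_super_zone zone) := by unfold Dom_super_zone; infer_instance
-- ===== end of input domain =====

-- B counts each shared edge once (right/down neighbour, set membership) and uses the identity 4*n - 2*shared; objective: alternative decomposition.


-- ===== PORT A =====
def super_zone (zone : List (Int × Int)) : Int :=
  zone.foldl (fun fences z =>
    [((0 : Int), (1 : Int)), (0, -1), (1, 0), (-1, 0)].foldl
      (fun f d => if (z.1 + d.1, z.2 + d.2) ∈ zone then f else f + 1) fences) 0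

-- ===== PORT B =====
def super_zone_alt (zone : List (Int × Int)) : Int :=
  let cells := PySem.Set.ofList zone
  let shared := zone.foldl (fun s z =>
    let s := if (z.1 + 1, z.2) ∈ cells then s + 1 else s
    if (z.1, z.2 + 1) ∈ cells then s + 1 else s) (0 : Int)
  4 * zone.length - 2 * shared

-- ===== PRECONDITION & SPEC =====
-- Pre_ excludes lists with duplicate coordinates: zone stands for a set of grid cells, and on
-- duplicate-carrying lists A's per-occurrence recount is an accident of the list representation
-- that the shared-edge identity deliberately does not reproduce.
def Pre_super_zone (zone : List (Int × Int)) : Prop := zone.Nodup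
instance (zone : List (Int × Int)) : Decidable (Pre_super_zone zone) := by unfold Pre_super_zone; infer_instance

def pvWitness_super_zone : (List (Int × Int)) := [(0, 0), (1, 0), (1, 1)]

def Spec_super_zone (zone : List (Int × Int)) (out : Int) : Prop := out = super_zone_alt zone
instance (zone : List (Int × Int)) (out : Int) : Decidable (Spec_super_zone zone out) := by unfold Spec_super_zone; infer_instance

-- ===== CLAIM (what is proved, stated in full; the proofs are below) =====
def Claim_equal_super_zone : Prop := ∀ (zone : List (Int × Int)), Dom_super_zone zone → Pre_super_zone zone → Spec_super_zone zone (super_zone zone)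

-- ===== LEMMAS AND PROOFS =====

-- indicator of membership, as an Int
def pvInd (cs : List (Int × Int)) (w : Int × Int) : Int := if w ∈ cs then 1 else 0

-- A's double loop is the sum over cells of (4 minus the number of present neighbours)
lemma A_foldl_sum (zone l : List (Int × Int)) (a : Int) :
    l.foldl (fun fences z =>
      [((0 : Int), (1 : Int)), (0, -1), (1, 0), (-1, 0)].foldl
        (fun f d => if (z.1 + d.1, z.2 + d.2) ∈ zone then f else f + 1) fences) a
    = a + (l.map (fun z => 4 - (pvInd zone (z.1, z.2 + 1) + pvInd zone (z.1, z.2 - 1)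
        + pvInd zone (z.1 + 1, z.2) + pvInd zone (z.1 - 1, z.2)))).sum := by
  induction l generalizing a with
  | nil => simp
  | cons z l ih =>
    rw [List.foldl_cons, ih]
    simp only [List.foldl, List.map_cons, List.sum_cons, pvInd, add_zero, ← sub_eq_add_neg]
    split_ifs <;> ring

-- B's loop is the sum over cells of the right/down indicators
lemma B_foldl_sum (zone l : List (Int × Int)) (a : Int) :
    l.foldl (fun s z =>
      let s := if (z.1 + 1, z.2) ∈ PySem.Set.ofList zone then s + 1 else s
      if (z.1, z.2 + 1) ∈ PySem.Set.ofList zone then s + 1 else s) a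
    = a + (l.map (fun z => pvInd zone (z.1 + 1, z.2) + pvInd zone (z.1, z.2 + 1))).sum := by
  induction l generalizing a with
  | nil => simp
  | cons z l ih =>
    rw [List.foldl_cons, ih]
    simp only [List.map_cons, List.sum_cons, pvInd, PySem.Set.mem_ofList]
    split_ifs <;> ring

-- sum of indicators = countP
lemma sum_ind_eq_countP (zone l : List (Int × Int)) (g : Int × Int → Int × Int) :
    (l.map (fun z => pvInd zone (g z))).sum = (l.countP (fun z => decide (g z ∈ zone)) : Int) := by
  induction l with
  | nil => simp
  | cons z l ih =>
    simp only [List.map_cons, List.sum_cons, List.countP_cons, ih]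
    by_cases h : g z ∈ zone <;> simp [pvInd, h] <;> push_cast <;> ring

-- the reflection symmetry: on a duplicate-free list, shifting by e and by -e hit the same number of cells
lemma countP_shift_symm (zone : List (Int × Int)) (h : zone.Nodup) (p q : Int) :
    zone.countP (fun z => decide ((z.1 + p, z.2 + q) ∈ zone))
      = zone.countP (fun z => decide ((z.1 - p, z.2 - q) ∈ zone)) := by
  rw [List.countP_eq_length_filter, List.countP_eq_length_filter]
  have hf1 : (zone.filter (fun z => decide ((z.1 + p, z.2 + q) ∈ zone))).Nodup := h.filter _
  have hf2 : (zone.filter (fun z => decide ((z.1 - p, z.2 - q) ∈ zone))).Nodup := h.filter _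
  rw [← List.toFinset_card_of_nodup hf1, ← List.toFinset_card_of_nodup hf2]
  apply Finset.card_nbij' (fun z => (z.1 + p, z.2 + q)) (fun z => (z.1 - p, z.2 - q))
  · intro z hz
    simp only [Finset.mem_coe, List.mem_toFinset, List.mem_filter,
      decide_eq_true_eq] at hz ⊢
    exact ⟨hz.2, by simpa using hz.1⟩
  · intro z hz
    simp only [Finset.mem_coe, List.mem_toFinset, List.mem_filter,
      decide_eq_true_eq] at hz ⊢
    exact ⟨hz.2, by simpa using hz.1⟩
  · intro z _; simp
  · intro z _; simp

lemma sum_ind_shift_symm (zone : List (Int × Int)) (h : zone.Nodup) (p q : Int) :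
    (zone.map (fun z => pvInd zone (z.1 + p, z.2 + q))).sum
      = (zone.map (fun z => pvInd zone (z.1 - p, z.2 - q))).sum := by
  rw [sum_ind_eq_countP zone zone (fun z => (z.1 + p, z.2 + q)),
      sum_ind_eq_countP zone zone (fun z => (z.1 - p, z.2 - q)),
      countP_shift_symm zone h p q]

lemma map_sum_split (f g : (Int × Int) → Int) (l : List (Int × Int)) :
    (l.map (fun z => f z + g z)).sum = (l.map f).sum + (l.map g).sum := by
  induction l with
  | nil => simp
  | cons z l ih => simp [ih]; ring

lemma A_sum_split (zone l : List (Int × Int)) :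
    (l.map (fun z => 4 - (pvInd zone (z.1, z.2 + 1) + pvInd zone (z.1, z.2 - 1)
      + pvInd zone (z.1 + 1, z.2) + pvInd zone (z.1 - 1, z.2)))).sum
    = 4 * l.length
      - ((l.map (fun z => pvInd zone (z.1, z.2 + 1))).sum
       + (l.map (fun z => pvInd zone (z.1, z.2 - 1))).sum
       + (l.map (fun z => pvInd zone (z.1 + 1, z.2))).sum
       + (l.map (fun z => pvInd zone (z.1 - 1, z.2))).sum) := by
  induction l with
  | nil => simp
  | cons z l ih => simp [ih]; push_cast; ring

-- ===== VERDICT (by name: the statement is the Claim_ definition above) =====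
theorem super_zone_spec : Claim_equal_super_zone := by
  intro zone _ hpre
  unfold Spec_super_zone super_zone super_zone_alt
  simp only [A_foldl_sum, B_foldl_sum]
  rw [A_sum_split zone zone, map_sum_split]
  have hd : (zone.map (fun z => pvInd zone (z.1, z.2 - 1))).sum
      = (zone.map (fun z => pvInd zone (z.1, z.2 + 1))).sum := by
    have := sum_ind_shift_symm zone hpre 0 1
    simp only [add_zero, sub_zero] at this
    exact this.symm
  have hl : (zone.map (fun z => pvInd zone (z.1 - 1, z.2))).sum
      = (zone.map (fun z => pvInd zone (z.1 + 1, z.2))).sum := by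
    have := sum_ind_shift_symm zone hpre 1 0
    simp only [add_zero, sub_zero] at this
    exact this.symm
  rw [hd, hl]
  ring
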